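-- pv_equiv track=rewrite | github.com/racovetdorin/crm_real_estate | test.py | add_newlines
-- ===== SOURCE A (Python) =====
-- def add_newlines(value):
--     words = value.split()
--     new_text = ""
--     word_count = 0
--     for word in words:
--         new_text += word + " "
--         word_count += 1
--         if word_count == 6 or "." in word:
--             new_text += "\n"
--             word_count = 0
--
--     return new_text
-- ===== SOURCE B (Python) =====
-- def add_newlines(value):
--     # Chunk-boundary search instead of per-word counting: repeatedly find the next
--     # break position (first word containing '.' among the next 6 words, else 6 words
--     # ahead if that many remain), emit that slice with a newline, then render the
--     # leftover tail without one.
--     words = value.split()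
--     n = len(words)
--     pieces = []
--     i = 0
--     while True:
--         j = None
--         for t in range(i, min(i + 6, n)):
--             if "." in words[t]:
--                 j = t + 1
--                 break
--         if j is None and i + 6 <= n:
--             j = i + 6
--         if j is None:
--             break
--         pieces.append("".join(w + " " for w in words[i:j]) + "\n")
--         i = j
--     pieces.append("".join(w + " " for w in words[i:]))
--     return "".join(pieces)
-- ===== Notes on version B (the rewrite author's own statement) =====
-- stated objective: alternative
-- what changed: B replaces A's per-word counter-and-reset loop with a chunk-boundary search: it repeatedly locates the next break index (first word containing '.' among the next 6 words, else 6 words ahead if that many remain), emits each words[i:j] slice with a trailing newline, and finally the leftover tail without one.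
import Mathlib
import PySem

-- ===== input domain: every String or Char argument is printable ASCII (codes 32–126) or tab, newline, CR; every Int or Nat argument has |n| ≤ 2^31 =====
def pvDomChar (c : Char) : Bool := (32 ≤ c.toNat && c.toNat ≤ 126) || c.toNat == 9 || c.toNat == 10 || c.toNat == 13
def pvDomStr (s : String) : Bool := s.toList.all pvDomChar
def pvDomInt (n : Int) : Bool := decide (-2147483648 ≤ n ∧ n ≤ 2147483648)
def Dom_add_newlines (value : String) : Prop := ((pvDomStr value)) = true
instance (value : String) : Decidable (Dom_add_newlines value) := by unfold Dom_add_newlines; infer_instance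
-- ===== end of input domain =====

-- B replaces A's per-word counter loop by chunk-boundary search: repeatedly find the next
-- break index (first '.'-word among the next 6 words, else 6 ahead) and emit whole slices;
-- objective: alternative decomposition, same cost.


-- '"." in word'
def dotIn (w : List Char) : Bool := PySem.Chars.isIn ['.'] w

-- ===== PORT A =====
-- loop body: new_text += word + " "; word_count += 1; if word_count == 6 or "." in word: new_text += "\n"; word_count = 0
def stepA (st : List Char × Nat) (w : List Char) : List Char × Nat :=
  let t := st.1 ++ w ++ [' ']
  let c := st.2 + 1
  if c = 6 || dotIn w then (t ++ ['\n'], 0) else (t, c)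

def add_newlines (value : String) : String :=
  String.ofList ((PySem.Chars.split₀ value.toList).foldl stepA ([], 0)).1

-- ===== PORT B =====
-- "".join(w + " " for w in ws)
def flatW (ws : List (List Char)) : List Char := (ws.map (· ++ [' '])).flatten

-- inner for-loop: first t in range(i, min(i+6, n)) with '.' in words[t], as j = t + 1;
-- else j = i + 6 if i + 6 <= n, else None
def breakJ (words : List (List Char)) (i : Nat) : Option Nat :=
  match ((words.drop i).take 6).findIdx? dotIn with
  | some r => some (i + r + 1)
  | none => if i + 6 ≤ words.length then some (i + 6) else none

theorem breakJ_some {words : List (List Char)} {i j : Nat}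
    (h : breakJ words i = some j) : i < j ∧ j ≤ words.length := by
  unfold breakJ at h
  cases hf : ((words.drop i).take 6).findIdx? dotIn with
  | some r =>
    rw [hf] at h
    have hr : r < ((words.drop i).take 6).length :=
      (List.findIdx?_eq_some_iff_findIdx_eq.mp hf).1
    have hl : ((words.drop i).take 6).length = min 6 (words.length - i) := by simp
    cases h
    omega
  | none =>
    rw [hf] at h
    split_ifs at h with hc
    cases h; omega

-- while loop of Source B (words and n are fixed; i advances to each break, pieces collects the output)
def loopB (words : List (List Char)) (i : Nat) (pieces : List (List Char)) : List (List Char) :=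
  match _h : breakJ words i with
  | some j => loopB words j (pieces ++ [flatW ((words.drop i).take (j - i)) ++ ['\n']])
  | none => pieces ++ [flatW (words.drop i)]
  termination_by words.length - i
  decreasing_by
    have := breakJ_some _h
    omega

def add_newlines_alt (value : String) : String :=
  String.ofList (PySem.Chars.join [] (loopB (PySem.Chars.split₀ value.toList) 0 []))

-- ===== PRECONDITION & SPEC =====
def Spec_add_newlines (value : String) (out : String) : Prop := out = add_newlines_alt value
instance (value : String) (out : String) : Decidable (Spec_add_newlines value out) := by unfold Spec_add_newlines; infer_instance

-- ===== CLAIM (what is proved, stated in full; the proofs are below) =====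
def Claim_equal_add_newlines : Prop := ∀ (value : String), Dom_add_newlines value → Spec_add_newlines value (add_newlines value)

-- ===== LEMMAS AND PROOFS =====
-- breakJ, re-expressed on the suffix words.drop i: first break of a word list ws within window m
def breakK (m : Nat) (ws : List (List Char)) : Option Nat :=
  match (ws.take m).findIdx? dotIn with
  | some r => some (r + 1)
  | none => if 1 ≤ m ∧ m ≤ ws.length then some m else none

theorem breakJ_eq (words : List (List Char)) (i : Nat) :
    breakJ words i = (breakK 6 (words.drop i)).map (i + ·) := by
  unfold breakJ breakK
  cases hf : ((words.drop i).take 6).findIdx? dotIn with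
  | some r => simp [Nat.add_assoc]
  | none =>
    have hl : (words.drop i).length = words.length - i := by simp
    split_ifs with h1 h2 h2 <;> simp_all <;> omega

theorem intercalate_nil (l : List (List Char)) : List.intercalate [] l = l.flatten := by
  induction l with
  | nil => rfl
  | cons h t ih =>
    cases t with
    | nil => simp [List.intercalate, List.intersperse]
    | cons h2 t2 =>
      have h3 : List.intercalate ([] : List Char) (h :: h2 :: t2)
          = h ++ List.intercalate [] (h2 :: t2) := by
        simp [List.intercalate, List.intersperse]
      rw [h3, ih]; simp

-- the accumulator of A's loop factors out of the first component
theorem foldl_stepA_acc (ws : List (List Char)) (acc : List Char) (c : Nat) :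
    ws.foldl stepA (acc, c)
      = (acc ++ (ws.foldl stepA ([], c)).1, (ws.foldl stepA ([], c)).2) := by
  induction ws generalizing acc c with
  | nil => simp
  | cons w t ih =>
    by_cases h : (c + 1 = 6 || dotIn w) = true
    · simp only [List.foldl_cons, stepA, h, if_pos]
      rw [ih, ih (([] : List Char) ++ w ++ [' '] ++ ['\n'])]
      simp [List.append_assoc]
    · simp only [List.foldl_cons, stepA, h, if_neg, Bool.false_eq_true, not_false_iff]
      rw [ih, ih (([] : List Char) ++ w ++ [' '])]
      simp [List.append_assoc]

-- if no break occurs within window m (and window not exceeded), A's loop just appends all words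
theorem foldl_stepA_none (ws : List (List Char)) (m : Nat) (acc : List Char)
    (h1 : 1 ≤ m) (h6 : m ≤ 6) (hb : breakK m ws = none) :
    ws.foldl stepA (acc, 6 - m) = (acc ++ flatW ws, 6 - m + ws.length) := by
  induction ws generalizing m acc with
  | nil => simp [flatW]
  | cons w t ih =>
    obtain ⟨m', rfl⟩ : ∃ m', m = m' + 1 := ⟨m - 1, by omega⟩
    unfold breakK at hb
    rw [List.take_succ_cons, List.findIdx?_cons] at hb
    by_cases hd : dotIn w = true
    · simp [hd] at hb
    · simp only [hd, if_neg, Bool.false_eq_true, not_false_iff] at hb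
      cases hf : (t.take m').findIdx? dotIn with
      | some r => simp [hf] at hb
      | none =>
        rw [hf] at hb
        simp only [Option.map_none] at hb
        split_ifs at hb with hc
        have hm' : ¬ (1 ≤ m' ∧ m' ≤ t.length) := by
          intro hh; exact hc ⟨by omega, by simpa using Nat.succ_le_succ hh.2⟩
        rcases Nat.eq_zero_or_pos m' with hz | hpos
        · exfalso; apply hc
          subst hz
          exact ⟨by omega, by simp⟩
        · have hbk : breakK m' t = none := by
            unfold breakK; rw [hf]; simp [hm']
          have hcond : ((6 - (m' + 1)) + 1 = 6 || dotIn w) = false := by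
            simp [hd]; omega
          simp only [List.foldl_cons, stepA, hcond, Bool.false_eq_true, if_false]
          have harg : 6 - (m' + 1) + 1 = 6 - m' := by omega
          rw [harg, ih m' (acc ++ w ++ [' ']) (by omega) (by omega) hbk]
          simp only [flatW, List.map_cons, List.flatten_cons, Prod.mk.injEq]
          constructor
          · simp [List.append_assoc]
          · simp only [List.length_cons]; omega

-- if the first break within window m is at k, A's loop emits words[:k] and "\n", resets, and continues
theorem foldl_stepA_some (ws : List (List Char)) (m k : Nat) (acc : List Char)
    (h1 : 1 ≤ m) (h6 : m ≤ 6) (hb : breakK m ws = some k) :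
    ws.foldl stepA (acc, 6 - m)
      = (ws.drop k).foldl stepA (acc ++ flatW (ws.take k) ++ ['\n'], 0) := by
  induction ws generalizing m k acc with
  | nil =>
    exfalso; unfold breakK at hb; simp at hb; omega
  | cons w t ih =>
    obtain ⟨m', rfl⟩ : ∃ m', m = m' + 1 := ⟨m - 1, by omega⟩
    unfold breakK at hb
    rw [List.take_succ_cons, List.findIdx?_cons] at hb
    by_cases hd : dotIn w = true
    · simp only [hd, if_pos] at hb
      cases hb
      simp [stepA, hd, flatW, List.append_assoc]
    · simp only [hd, if_neg, Bool.false_eq_true, not_false_iff] at hb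
      cases hf : (t.take m').findIdx? dotIn with
      | some r =>
        rw [hf] at hb
        simp only [Option.map_some] at hb
        cases hb
        have hr := List.findIdx?_eq_some_iff_findIdx_eq.mp hf
        have hrl : (t.take m').length ≤ t.length := by simp [List.length_take]
        have hm'pos : 1 ≤ m' := by
          rcases Nat.eq_zero_or_pos m' with hz | h; · subst hz; simp at hr
          · exact h
        have hbk : breakK m' t = some (r + 1) := by unfold breakK; rw [hf]
        have hcond : ((6 - (m' + 1)) + 1 = 6 || dotIn w) = false := by
          simp [hd]; omega
        simp only [List.foldl_cons, stepA, hcond, Bool.false_eq_true, if_false]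
        have harg : 6 - (m' + 1) + 1 = 6 - m' := by omega
        rw [harg, ih m' (r + 1) (acc ++ w ++ [' ']) hm'pos (by omega) hbk]
        simp [flatW, List.append_assoc]
      | none =>
        rw [hf] at hb
        simp only [Option.map_none] at hb
        split_ifs at hb with hc
        · cases hb
          rcases Nat.eq_zero_or_pos m' with hz | hpos
          · -- m = 1: the counter reaches 6 at w, break after exactly this word
            subst hz
            simp [stepA, flatW, List.append_assoc]
          · have hbk : breakK m' t = some m' := by
              unfold breakK; rw [hf]
              rw [if_pos ⟨hpos, by have := hc.2; simpa using Nat.le_of_succ_le_succ this⟩]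
            have hcond : ((6 - (m' + 1)) + 1 = 6 || dotIn w) = false := by
              simp [hd]; omega
            simp only [List.foldl_cons, stepA, hcond, Bool.false_eq_true, if_false]
            have harg : 6 - (m' + 1) + 1 = 6 - m' := by omega
            rw [harg, ih m' m' (acc ++ w ++ [' ']) hpos (by omega) hbk]
            simp [flatW, List.append_assoc]

-- Source B's while loop, flattened, equals what A's loop produces on the remaining suffix
theorem loopB_flatten (fuel : Nat) (words : List (List Char)) (i : Nat)
    (pieces : List (List Char)) (hfuel : words.length - i ≤ fuel) :
    (loopB words i pieces).flatten
      = pieces.flatten ++ ((words.drop i).foldl stepA ([], 0)).1 := by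
  induction fuel generalizing i pieces with
  | zero =>
    rw [loopB]
    cases hb : breakJ words i with
    | some j => have := breakJ_some hb; omega
    | none =>
      have hk : breakK 6 (words.drop i) = none := by
        have := breakJ_eq words i
        rw [hb] at this
        cases h : breakK 6 (words.drop i) <;> simp [h] at this ⊢
      have := foldl_stepA_none (words.drop i) 6 [] (by omega) (by omega) hk
      simp only [Nat.sub_self] at this
      simp [this]
  | succ f ih =>
    rw [loopB]
    cases hb : breakJ words i with
    | none =>
      have hk : breakK 6 (words.drop i) = none := by
        have := breakJ_eq words i
        rw [hb] at this
        cases h : breakK 6 (words.drop i) <;> simp [h] at this ⊢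
      have := foldl_stepA_none (words.drop i) 6 [] (by omega) (by omega) hk
      simp only [Nat.sub_self] at this
      simp [this]
    | some j =>
      obtain ⟨hij, hjl⟩ := breakJ_some hb
      obtain ⟨k, hk, hjk⟩ : ∃ k, breakK 6 (words.drop i) = some k ∧ j = i + k := by
        have := breakJ_eq words i
        rw [hb] at this
        cases h : breakK 6 (words.drop i) with
        | none => rw [h] at this; simp at this
        | some k => rw [h] at this; simp at this; exact ⟨k, rfl, this⟩
      rw [ih j _ (by omega)]
      have hmain := foldl_stepA_some (words.drop i) 6 k [] (by omega) (by omega) hk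
      simp only [Nat.sub_self] at hmain
      have hdd : (words.drop i).drop k = words.drop j := by
        rw [List.drop_drop, hjk]
      have hki : k = j - i := by omega
      rw [hmain, hdd,
        foldl_stepA_acc (words.drop j) (([] : List Char) ++ flatW ((words.drop i).take k) ++ ['\n']) 0]
      simp [hki, List.append_assoc]

-- ===== VERDICT (by name: the statement is the Claim_ definition above) =====
theorem add_newlines_spec : Claim_equal_add_newlines := by
  intro value _
  unfold Spec_add_newlines add_newlines add_newlines_alt
  have h := loopB_flatten (PySem.Chars.split₀ value.toList).length
      (PySem.Chars.split₀ value.toList) 0 [] (by omega)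
  congr 1
  rw [show PySem.Chars.join ([] : List Char) = fun l => List.intercalate [] l from rfl]
  simp only [intercalate_nil]
  rw [h]
  simp
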